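-- pv_equiv track=rewrite | github.com/Hrshed/Semantic-Segmentation-Guided-Neural-Video-Compression | trainer_seg_video_model.py | _auto_normalize_ckpt_state_dict
-- ===== SOURCE A (Python) =====
-- def _auto_normalize_ckpt_state_dict(ckpt_sd: dict, target_keys: set) -> tuple[dict, str, int]:
--     candidates = ["", "p_frame_model.", "model.", "module.", "net.", "video.", "video_model.", "p_model."]
--     roots = {k.split('.', 1)[0] + "." for k in ckpt_sd.keys() if "." in k}
--     candidates += sorted(roots)
--
--     best_sd, best_pref, best_hits = {}, "", -1
--     for pref in candidates:
--         remap = {k[len(pref):]: v for k, v in ckpt_sd.items() if k.startswith(pref)}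
--         hits = sum(1 for k in remap.keys() if k in target_keys)
--         if hits > best_hits:
--             best_sd, best_pref, best_hits = remap, pref, hits
--     return best_sd, best_pref, best_hits
-- ===== SOURCE B (Python) =====
-- def _auto_normalize_ckpt_state_dict(ckpt_sd: dict, target_keys: set) -> tuple[dict, str, int]:
--     fixed = ["", "p_frame_model.", "model.", "module.", "net.", "video.", "video_model.", "p_model."]
--     fixed_set = set(fixed)
--     roots = sorted({k.split('.', 1)[0] + "." for k in ckpt_sd if "." in k})
--
--     # one pass over the checkpoint keys: bucket hit counts per candidate prefix
--     # (a key can only match a root-candidate that is its own first segment)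
--     hits = {}
--     for k in ckpt_sd:
--         for p in fixed:
--             if k.startswith(p) and k[len(p):] in target_keys:
--                 hits[p] = hits.get(p, 0) + 1
--         if "." in k:
--             r = k.split('.', 1)[0] + "."
--             if r not in fixed_set and k[len(r):] in target_keys:
--                 hits[r] = hits.get(r, 0) + 1
--
--     best_pref, best_hits = "", -1
--     for p in fixed + roots:
--         h = hits.get(p, 0)
--         if h > best_hits:
--             best_pref, best_hits = p, h
--
--     best_sd = {k[len(best_pref):]: v for k, v in ckpt_sd.items() if k.startswith(best_pref)}
--     return best_sd, best_pref, best_hits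
-- ===== Notes on version B (the rewrite author's own statement) =====
-- stated objective: alternative
-- what changed: Instead of building a remapped dict and rescanning it for every candidate prefix (fixed prefixes plus one per distinct key root), B makes one pass over the checkpoint keys bucketing hit counts per candidate prefix (a key can only match the root candidate that is its own first segment), picks the first maximum in candidate order, and builds the remapped dict once for the winner.
import Mathlib
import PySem

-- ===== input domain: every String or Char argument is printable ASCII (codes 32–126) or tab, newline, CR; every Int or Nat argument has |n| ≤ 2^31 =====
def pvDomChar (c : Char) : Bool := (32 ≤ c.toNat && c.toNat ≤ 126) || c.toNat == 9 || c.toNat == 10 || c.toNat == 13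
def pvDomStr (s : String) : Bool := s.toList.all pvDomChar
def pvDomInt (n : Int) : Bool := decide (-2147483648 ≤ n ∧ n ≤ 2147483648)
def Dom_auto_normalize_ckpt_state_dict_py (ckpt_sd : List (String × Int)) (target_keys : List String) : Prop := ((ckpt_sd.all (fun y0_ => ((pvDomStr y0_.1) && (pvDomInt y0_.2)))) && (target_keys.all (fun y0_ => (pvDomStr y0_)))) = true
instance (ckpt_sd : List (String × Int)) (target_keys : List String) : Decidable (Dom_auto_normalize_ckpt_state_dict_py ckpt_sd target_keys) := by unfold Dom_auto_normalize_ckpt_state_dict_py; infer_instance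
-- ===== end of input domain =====

-- ===== PORT A =====
-- B replaces the per-candidate rescan by one bucketing pass over the keys that counts hits per candidate prefix (alternative algorithm, same result).
-- Shared helper: the subexpression  k.split('.', 1)[0] + "."  appearing in both sources.
def pvRootOf (k : String) : String :=
  PySem.List.pyGetD ((PySem.Str.splitMax? k "." 1).getD []) 0 "" ++ "."

def auto_normalize_ckpt_state_dict_py (ckpt_sd : List (String × Int)) (target_keys : List String) : (List (String × Int)) × String × Int :=
  let candidates : List String :=
    ["", "p_frame_model.", "model.", "module.", "net.", "video.", "video_model.", "p_model."] ++
      PySem.List.sorted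
        (PySem.Set.ofList ((ckpt_sd.filter (fun kv => PySem.Str.isIn "." kv.1)).map (fun kv => pvRootOf kv.1)))
        (fun x => x) false
  let final :=
    candidates.foldl (fun st pref =>
        let remap : PySem.Dict String Int :=
          PySem.Dict.ofList ((ckpt_sd.filter (fun kv => PySem.Str.startswith kv.1 pref)).map
            (fun kv => (PySem.Str.slice kv.1 (some (PySem.Str.len pref)) none, kv.2)))
        let hits : Int := ((remap.keys.map (fun k => if target_keys.contains k then (1 : Int) else 0)).sum)
        if hits > st.2.2 then (remap, pref, hits) else st)
      (PySem.Dict.empty, "", -1)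
  (final.1.items, final.2.1, final.2.2)

-- ===== PORT B =====
def pvBump (d : PySem.Dict String Int) (p : String) : PySem.Dict String Int :=
  d.insert p (d.getD p 0 + 1)

def auto_normalize_ckpt_state_dict_py_alt (ckpt_sd : List (String × Int)) (target_keys : List String) : (List (String × Int)) × String × Int :=
  let fixed : List String := ["", "p_frame_model.", "model.", "module.", "net.", "video.", "video_model.", "p_model."]
  let fixedSet : PySem.Set String := PySem.Set.ofList fixed
  let roots : List String :=
    PySem.List.sorted
      (PySem.Set.ofList ((ckpt_sd.filter (fun kv => PySem.Str.isIn "." kv.1)).map (fun kv => pvRootOf kv.1)))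
      (fun x => x) false
  let hits : PySem.Dict String Int :=
    ckpt_sd.foldl (fun d kv =>
        let d1 := fixed.foldl (fun d p =>
            if PySem.Str.startswith kv.1 p &&
                target_keys.contains (PySem.Str.slice kv.1 (some (PySem.Str.len p)) none) then
              pvBump d p
            else d) d
        if PySem.Str.isIn "." kv.1 then
          let r := pvRootOf kv.1
          if !(fixedSet.contains r) &&
              target_keys.contains (PySem.Str.slice kv.1 (some (PySem.Str.len r)) none) then
            pvBump d1 r
          else d1
        else d1)
      PySem.Dict.empty
  let sel :=
    (fixed ++ roots).foldl (fun st p =>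
        let h := hits.getD p 0
        if h > st.2 then (p, h) else st)
      ("", -1)
  let best_sd : PySem.Dict String Int :=
    PySem.Dict.ofList ((ckpt_sd.filter (fun kv => PySem.Str.startswith kv.1 sel.1)).map
      (fun kv => (PySem.Str.slice kv.1 (some (PySem.Str.len sel.1)) none, kv.2)))
  (best_sd.items, sel.1, sel.2)

-- ===== PRECONDITION & SPEC =====
-- Pre_ requires the checkpoint keys to be pairwise distinct: the Python argument is a dict, whose
-- keys are necessarily unique, so this excludes no input the Python function can receive.
def Pre_auto_normalize_ckpt_state_dict_py (ckpt_sd : List (String × Int)) (target_keys : List String) : Prop :=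
  (ckpt_sd.map Prod.fst).Nodup
instance (ckpt_sd : List (String × Int)) (target_keys : List String) : Decidable (Pre_auto_normalize_ckpt_state_dict_py ckpt_sd target_keys) := by unfold Pre_auto_normalize_ckpt_state_dict_py; infer_instance

def pvWitness_auto_normalize_ckpt_state_dict_py : (List (String × Int)) × List String :=
  ([("model.w", 1), ("model.b", 2), ("x", 3)], ["w", "b"])

def Spec_auto_normalize_ckpt_state_dict_py (ckpt_sd : List (String × Int)) (target_keys : List String) (out : (List (String × Int)) × String × Int) : Prop := out = auto_normalize_ckpt_state_dict_py_alt ckpt_sd target_keys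
instance (ckpt_sd : List (String × Int)) (target_keys : List String) (out : (List (String × Int)) × String × Int) : Decidable (Spec_auto_normalize_ckpt_state_dict_py ckpt_sd target_keys out) := by unfold Spec_auto_normalize_ckpt_state_dict_py; infer_instance

-- ===== CLAIM (what is proved, stated in full; the proofs are below) =====
def Claim_equal_auto_normalize_ckpt_state_dict_py : Prop := ∀ (ckpt_sd : List (String × Int)) (target_keys : List String), Dom_auto_normalize_ckpt_state_dict_py ckpt_sd target_keys → Pre_auto_normalize_ckpt_state_dict_py ckpt_sd target_keys → Spec_auto_normalize_ckpt_state_dict_py ckpt_sd target_keys (auto_normalize_ckpt_state_dict_py ckpt_sd target_keys)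

-- ===== LEMMAS AND PROOFS =====

-- Proof-only abbreviations for the common pieces of both ports
def pvSw (k p : String) : Bool := PySem.Str.startswith k p
def pvStrip (k p : String) : String := PySem.Str.slice k (some (PySem.Str.len p)) none
def pvHit (t : List String) (p : String) (kv : String × Int) : Bool :=
  pvSw kv.1 p && t.contains (pvStrip kv.1 p)
def pvCnt (c : List (String × Int)) (t : List String) (p : String) : Int :=
  (c.countP (pvHit t p) : Int)
def pvRemap (c : List (String × Int)) (p : String) : PySem.Dict String Int :=
  PySem.Dict.ofList ((c.filter (fun kv => PySem.Str.startswith kv.1 p)).map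
    (fun kv => (PySem.Str.slice kv.1 (some (PySem.Str.len p)) none, kv.2)))
def pvFixed : List String := ["", "p_frame_model.", "model.", "module.", "net.", "video.", "video_model.", "p_model."]
def pvRoots (c : List (String × Int)) : List String :=
  PySem.List.sorted
    (PySem.Set.ofList ((c.filter (fun kv => PySem.Str.isIn "." kv.1)).map (fun kv => pvRootOf kv.1)))
    (fun x => x) false
def pvContrib (t : List String) (kv : String × Int) (q : String) : Bool :=
  if q ∈ pvFixed then pvHit t q kv
  else PySem.Str.isIn "." kv.1 && (pvRootOf kv.1 == q) && t.contains (pvStrip kv.1 (pvRootOf kv.1))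

-- ---- string facts ----
lemma pv_strip_toList (k p : String) : (pvStrip k p).toList = k.toList.drop p.toList.length := by
  simp [pvStrip, PySem.Str.toList_slice, PySem.Str.len_eq, PySem.List.slice_from_natCast]

lemma pv_sw_decomp {k p : String} (h : pvSw k p = true) :
    k.toList = p.toList ++ (pvStrip k p).toList := by
  rw [pv_strip_toList]
  obtain ⟨t, ht⟩ := (PySem.Chars.startswith_iff _ _).1
    (by simpa [pvSw, PySem.Str.startswith_eq] using h)
  rw [← ht]; simp

lemma pv_strip_inj {k1 k2 p : String} (h1 : pvSw k1 p = true) (h2 : pvSw k2 p = true)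
    (he : pvStrip k1 p = pvStrip k2 p) : k1 = k2 := by
  apply String.toList_inj.1
  rw [pv_sw_decomp h1, pv_sw_decomp h2, he]

lemma pv_go_zero (sep : List Char) (fuel : Nat) (l cur : List Char) (acc : List (List Char)) :
    PySem.Chars.splitOnMax.go sep fuel 0 l cur acc = ((cur.reverse ++ l) :: acc).reverse := by
  cases fuel <;> cases l <;> simp [PySem.Chars.splitOnMax.go]

lemma pv_go_head (l : List Char) : ∀ (fuel : Nat) (cur : List Char), l.length < fuel →
    ∃ t, PySem.Chars.splitOnMax.go ['.'] fuel 1 l cur []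
      = (cur.reverse ++ l.takeWhile (· != '.')) :: t := by
  induction l with
  | nil =>
    intro fuel cur h
    cases fuel with
    | zero => omega
    | succ f => exact ⟨[], by simp [PySem.Chars.splitOnMax.go]⟩
  | cons c rest ih =>
    intro fuel cur h
    cases fuel with
    | zero => omega
    | succ f =>
      by_cases hc : c = '.'
      · subst hc
        refine ⟨[rest], ?_⟩
        simp [PySem.Chars.splitOnMax.go, List.isPrefixOf, pv_go_zero]
      · obtain ⟨t, ht⟩ := ih f (c :: cur) (by simp at h ⊢; omega)
        refine ⟨t, ?_⟩
        have hpre : List.isPrefixOf ['.'] (c :: rest) = false := by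
          simp [List.isPrefixOf]; exact fun hcc => (hc hcc.symm).elim
        simp [PySem.Chars.splitOnMax.go, hpre, ht, hc]

lemma pv_rootOf_toList (k : String) :
    (pvRootOf k).toList = k.toList.takeWhile (· != '.') ++ ['.'] := by
  obtain ⟨t, ht⟩ := pv_go_head k.toList (k.length + 1) [] (by simp)
  unfold pvRootOf
  simp [PySem.Str.splitMax?, PySem.Chars.splitMax?, PySem.Chars.splitOnMax, ht]

lemma pv_root_shape (k : String) : ∃ w, (pvRootOf k).toList = w ++ ['.'] ∧ '.' ∉ w := by
  refine ⟨_, pv_rootOf_toList k, fun hm => ?_⟩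
  have := List.mem_takeWhile_imp hm
  simp at this

lemma pv_takeWhile_fst {w t : List Char} (hw : '.' ∉ w) :
    (w ++ '.' :: t).takeWhile (· != '.') = w := by
  induction w with
  | nil => simp
  | cons a as ihw =>
    have ha : a ≠ '.' := fun h => hw (h ▸ List.mem_cons_self ..)
    simp at hw
    simp [ha, ihw hw.2]

lemma pv_root_spec {q : String} (hw : ∃ w, q.toList = w ++ ['.'] ∧ '.' ∉ w) (k : String) :
    pvSw k q = (PySem.Str.isIn "." k && (pvRootOf k == q)) := by
  obtain ⟨w, hq, hnw⟩ := hw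
  have hdot : (".").toList = ['.'] := rfl
  rw [Bool.eq_iff_iff]
  simp only [pvSw, PySem.Str.startswith_eq, PySem.Chars.startswith_iff, Bool.and_eq_true,
    beq_iff_eq, PySem.Str.isIn_iff_infix, hdot, List.singleton_infix_iff]
  constructor
  · rintro ⟨t, ht⟩
    rw [hq] at ht
    have hk : k.toList = w ++ '.' :: t := by rw [← ht]; simp
    refine ⟨by rw [hk]; simp, ?_⟩
    apply String.toList_inj.1
    rw [pv_rootOf_toList, hq, hk, pv_takeWhile_fst hnw]
  · rintro ⟨hmem, hroot⟩
    have hne : k.toList.dropWhile (· != '.') ≠ [] := by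
      intro hnil
      have : k.toList = k.toList.takeWhile (· != '.') := by
        conv_lhs => rw [← List.takeWhile_append_dropWhile (p := (· != '.')) (l := k.toList)]
        rw [hnil]; simp
      rw [this] at hmem
      have := List.mem_takeWhile_imp hmem
      simp at this
    obtain ⟨a, rest2, hd⟩ : ∃ a rest2, k.toList.dropWhile (· != '.') = a :: rest2 := by
      cases hcase : k.toList.dropWhile (· != '.') with
      | nil => exact absurd hcase hne
      | cons a rest2 => exact ⟨a, rest2, rfl⟩
    have ha : a = '.' := by
      have h0 := List.head_dropWhile_not (p := (· != '.')) (l := k.toList) hne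
      simp [hd] at h0
      simpa using h0
    have hsplit : k.toList = k.toList.takeWhile (· != '.') ++ '.' :: rest2 := by
      conv_lhs => rw [← List.takeWhile_append_dropWhile (p := (· != '.')) (l := k.toList)]
      rw [hd, ha]
    have htw : k.toList.takeWhile (· != '.') = w := by
      have h2 := congrArg String.toList hroot
      rw [pv_rootOf_toList, hq] at h2
      exact (List.append_left_inj ['.']).1 h2
    rw [hq]
    refine ⟨rest2, ?_⟩
    rw [hsplit, htw]
    simp

-- ---- A side: per-candidate remap and hit count ----
lemma pv_remap_items {c : List (String × Int)} (hnd : (c.map Prod.fst).Nodup) (p : String) :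
    (pvRemap c p).items
      = (c.filter (fun kv => pvSw kv.1 p)).map (fun kv => (pvStrip kv.1 p, kv.2)) := by
  have hfst : ((c.filter (fun kv => pvSw kv.1 p)).map Prod.fst).Nodup :=
    hnd.sublist (List.Sublist.map Prod.fst List.filter_sublist)
  have hinj := List.inj_on_of_nodup_map hfst
  have hkmap : ((c.filter (fun kv => pvSw kv.1 p)).map (fun kv => pvStrip kv.1 p)).Nodup := by
    refine List.Nodup.map_on ?_ (List.Nodup.of_map Prod.fst hfst)
    intro x hx y hy hxy
    have hswx : pvSw x.1 p = true := (List.mem_filter.1 hx).2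
    have hswy : pvSw y.1 p = true := (List.mem_filter.1 hy).2
    exact hinj hx hy (pv_strip_inj hswx hswy hxy)
  have hfresh := PySem.Dict.items_foldl_insert_fresh
      (l := c.filter (fun kv => pvSw kv.1 p))
      (fun kv => pvStrip kv.1 p) (fun kv => kv.2) PySem.Dict.empty
      (fun a _ => PySem.Dict.contains_empty _) hkmap
  unfold pvRemap PySem.Dict.ofList PySem.Dict.update
  rw [List.foldl_map]
  simpa [PySem.Dict.empty, pvStrip, pvSw] using hfresh

lemma pv_hitsA {c : List (String × Int)} (hnd : (c.map Prod.fst).Nodup)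
    (t : List String) (p : String) :
    (((pvRemap c p).keys.map (fun k => if t.contains k then (1 : Int) else 0)).sum)
      = pvCnt c t p := by
  have hkeys : (pvRemap c p).keys
      = (c.filter (fun kv => pvSw kv.1 p)).map (fun kv => pvStrip kv.1 p) := by
    show (pvRemap c p).items.map Prod.fst = _
    rw [pv_remap_items hnd p, List.map_map]
    rfl
  rw [hkeys, PySem.List.sum_map_ite_one_zero, List.countP_map, List.countP_filter]
  unfold pvCnt
  congr 1
  apply List.countP_congr
  intro kv _
  simp [pvHit, Function.comp, Bool.and_comm]

-- ---- B side: the counting pass ----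
lemma pv_bump_getD (d : PySem.Dict String Int) (p q : String) :
    (pvBump d p).getD q 0 = if q = p then d.getD p 0 + 1 else d.getD q 0 := by
  unfold pvBump
  rw [PySem.Dict.getD_insert]

lemma pv_fold_bump_getD (C : String → Bool) :
    ∀ (L : List String), L.Nodup → ∀ (d : PySem.Dict String Int) (q : String),
    (L.foldl (fun d p => if C p then pvBump d p else d) d).getD q 0
      = d.getD q 0 + (if q ∈ L ∧ C q = true then 1 else 0) := by
  intro L
  induction L with
  | nil => intro _ d q; simp
  | cons p rest ih =>
    intro hnd d q
    have hnp : p ∉ rest := (List.nodup_cons.1 hnd).1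
    rw [List.foldl_cons, ih (List.nodup_cons.1 hnd).2]
    have hb : (if C p = true then pvBump d p else d).getD q 0
        = d.getD q 0 + (if q = p ∧ C p = true then 1 else 0) := by
      by_cases hC : C p = true <;> by_cases hqp : q = p <;>
        simp [hC, hqp, pv_bump_getD]
    rw [hb]
    by_cases hqp : q = p
    · subst hqp
      by_cases hC : C q = true <;> simp [hnp, hC]
    · by_cases hm : q ∈ rest <;> by_cases hC : C q = true <;>
        simp [hqp, hm, hC]

lemma pv_contrib_eq_hit {c : List (String × Int)} {q : String}
    (hq : q ∈ pvFixed ∨ q ∈ pvRoots c) (t : List String) (kv : String × Int) :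
    pvContrib t kv q = pvHit t q kv := by
  by_cases hf : q ∈ pvFixed
  · unfold pvContrib; rw [if_pos hf]
  · have hq' : q ∈ pvRoots c := hq.resolve_left hf
    have hmem : q ∈ (c.filter (fun kv => PySem.Str.isIn "." kv.1)).map (fun kv => pvRootOf kv.1) := by
      have h1 := (PySem.List.mem_sorted _ _ _ _).1 hq'
      exact (PySem.Set.mem_ofList _ _).1 h1
    obtain ⟨kv0, _, hk0⟩ := List.mem_map.1 hmem
    have hshape : ∃ w, q.toList = w ++ ['.'] ∧ '.' ∉ w := by
      rw [← hk0]; exact pv_root_shape kv0.1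
    unfold pvContrib pvHit
    rw [if_neg hf, pv_root_spec hshape kv.1]
    by_cases hr : pvRootOf kv.1 = q
    · rw [hr]
    · have hb : (pvRootOf kv.1 == q) = false := by simp [hr]
      simp [hb]

-- ---- selection ----
lemma pv_sel_fold (H : String → Int) (RM : String → PySem.Dict String Int) :
    ∀ (L : List String) (d : PySem.Dict String Int) (p : String) (h : Int), d = RM p →
    L.foldl (fun st pref => if H pref > st.2.2 then (RM pref, pref, H pref) else st) (d, p, h)
      = ((RM (L.foldl (fun st pq => if H pq > st.2 then (pq, H pq) else st) (p, h)).1),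
         L.foldl (fun st pq => if H pq > st.2 then (pq, H pq) else st) (p, h)) := by
  intro L
  induction L with
  | nil => intro d p h hd; simp [hd]
  | cons x rest ih =>
    intro d p h hd
    by_cases hx : H x > h
    · simp only [List.foldl_cons, hd]
      rw [if_pos hx, if_pos hx]
      exact ih _ _ _ rfl
    · simp only [List.foldl_cons, hd]
      rw [if_neg hx, if_neg hx]
      exact ih _ _ _ rfl



-- ---- B side: per-key step and the whole counting pass ----
def pvStepKeyB (t : List String) (d : PySem.Dict String Int) (kv : String × Int) : PySem.Dict String Int :=
  let d1 := pvFixed.foldl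
      (fun d p => if pvSw kv.1 p && t.contains (pvStrip kv.1 p) then pvBump d p else d) d
  if PySem.Str.isIn "." kv.1 then
    let r := pvRootOf kv.1
    if !((PySem.Set.ofList pvFixed).contains r) && t.contains (pvStrip kv.1 r) then pvBump d1 r
    else d1
  else d1

lemma pv_stepKeyB_getD (t : List String) (kv : String × Int) (d : PySem.Dict String Int) (q : String) :
    (pvStepKeyB t d kv).getD q 0 = d.getD q 0 + (if pvContrib t kv q = true then 1 else 0) := by
  have hfixnd : pvFixed.Nodup := by decide
  have hofl : PySem.Set.ofList pvFixed = pvFixed := by decide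
  have hd1 := fun q => pv_fold_bump_getD (fun p => pvSw kv.1 p && t.contains (pvStrip kv.1 p)) pvFixed hfixnd d q
  unfold pvStepKeyB
  rw [hofl]
  by_cases hdot : PySem.Str.isIn "." kv.1 = true
  · rw [if_pos hdot]
    dsimp only
    by_cases hg : (!(PySem.Set.contains pvFixed (pvRootOf kv.1)) && t.contains (pvStrip kv.1 (pvRootOf kv.1))) = true
    · rw [if_pos hg, pv_bump_getD, hd1 (pvRootOf kv.1)]
      have hgc : PySem.Set.contains pvFixed (pvRootOf kv.1) = false := by
        simp only [Bool.and_eq_true, Bool.not_eq_true'] at hg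
        exact hg.1
      have hgt : t.contains (pvStrip kv.1 (pvRootOf kv.1)) = true := by
        simp only [Bool.and_eq_true] at hg
        exact hg.2
      have hrnot : pvRootOf kv.1 ∉ pvFixed := fun hm => by
        rw [(PySem.Set.contains_iff _ _).2 hm] at hgc
        cases hgc
      by_cases hqr : q = pvRootOf kv.1
      · subst hqr
        rw [if_pos rfl]
        unfold pvContrib
        rw [if_neg hrnot]
        have hdot2 : PySem.Chars.isIn ['.'] kv.1.toList = true := by simpa using hdot
        have hgt2 : pvStrip kv.1 (pvRootOf kv.1) ∈ t := by simpa using hgt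
        simp [hrnot, hdot2, hgt2]
      · rw [if_neg hqr, hd1 q]
        unfold pvContrib
        by_cases hf : q ∈ pvFixed
        · rw [if_pos hf]; unfold pvHit; simp [hf]
        · rw [if_neg hf]
          have hb : (pvRootOf kv.1 == q) = false := beq_eq_false_iff_ne.2 (fun h => hqr h.symm)
          simp [hf, hb]
    · rw [if_neg hg, hd1 q]
      unfold pvContrib
      by_cases hf : q ∈ pvFixed
      · rw [if_pos hf]; unfold pvHit; simp [hf]
      · rw [if_neg hf]
        by_cases hr : pvRootOf kv.1 = q
        · have hsc : PySem.Set.contains pvFixed (pvRootOf kv.1) = false := by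
            cases hcc : PySem.Set.contains pvFixed (pvRootOf kv.1) with
            | false => rfl
            | true => exact absurd (hr ▸ (PySem.Set.contains_iff _ _).1 hcc) hf
          have htf : t.contains (pvStrip kv.1 (pvRootOf kv.1)) = false := by
            cases htc : t.contains (pvStrip kv.1 (pvRootOf kv.1)) with
            | false => rfl
            | true => exact absurd (by rw [hsc, htc]; rfl) hg
          have htf2 : pvStrip kv.1 q ∉ t := fun hm => by
            rw [hr, List.contains_iff_mem.2 hm] at htf
            cases htf
          simp [hf, hr, htf2]
        · have hb : (pvRootOf kv.1 == q) = false := by simp [hr]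
          simp [hf, hb]
  · rw [if_neg hdot, hd1 q]
    unfold pvContrib
    by_cases hf : q ∈ pvFixed
    · rw [if_pos hf]; unfold pvHit; simp [hf]
    · rw [if_neg hf]
      have hdot2 : PySem.Chars.isIn ['.'] kv.1.toList = false := by
        simpa using Bool.eq_false_iff.2 hdot
      simp [hf, hdot2]

def pvHitsDictB (c : List (String × Int)) (t : List String) : PySem.Dict String Int :=
  c.foldl (pvStepKeyB t) PySem.Dict.empty

lemma pv_hitsDict_getD (c : List (String × Int)) (t : List String) (q : String) :
    (pvHitsDictB c t).getD q 0 = (c.countP (fun kv => pvContrib t kv q) : Int) := by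
  unfold pvHitsDictB
  suffices h : ∀ d : PySem.Dict String Int,
      (c.foldl (pvStepKeyB t) d).getD q 0 = d.getD q 0 + (c.countP (fun kv => pvContrib t kv q) : Int) by
    simpa [PySem.Dict.getD_empty] using h PySem.Dict.empty
  induction c with
  | nil => intro d; simp
  | cons kv rest ih =>
    intro d
    rw [List.foldl_cons, ih, pv_stepKeyB_getD, List.countP_cons]
    by_cases hc : pvContrib t kv q = true <;> simp [hc] <;> ring

lemma pv_hitsDict_eq_cnt {c : List (String × Int)} {t : List String} {q : String}
    (hq : q ∈ pvFixed ++ pvRoots c) :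
    (pvHitsDictB c t).getD q 0 = pvCnt c t q := by
  rw [pv_hitsDict_getD]
  unfold pvCnt
  congr 1
  apply List.countP_congr
  intro kv _
  rw [pv_contrib_eq_hit (by simpa using hq) t kv]

def pvHitsSumA (c : List (String × Int)) (t : List String) (p : String) : Int :=
  ((pvRemap c p).keys.map (fun k => if t.contains k then (1 : Int) else 0)).sum

lemma pv_A_char (c : List (String × Int)) (t : List String) :
    auto_normalize_ckpt_state_dict_py c t
      = (let f := (pvFixed ++ pvRoots c).foldl
            (fun st pref =>
              if pvHitsSumA c t pref > st.2.2 then (pvRemap c pref, pref, pvHitsSumA c t pref) else st)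
            (PySem.Dict.empty, "", -1)
         (f.1.items, f.2.1, f.2.2)) := rfl

lemma pv_B_char (c : List (String × Int)) (t : List String) :
    auto_normalize_ckpt_state_dict_py_alt c t
      = (let sel := (pvFixed ++ pvRoots c).foldl
            (fun st p =>
              if (pvHitsDictB c t).getD p 0 > st.2 then (p, (pvHitsDictB c t).getD p 0) else st)
            ("", -1)
         ((pvRemap c sel.1).items, sel.1, sel.2)) := rfl

lemma pv_cnt_nonneg (c : List (String × Int)) (t : List String) (p : String) :
    (0 : Int) ≤ pvCnt c t p := by
  unfold pvCnt; positivity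

-- ===== VERDICT (by name: the statement is the Claim_ definition above) =====
theorem auto_normalize_ckpt_state_dict_py_spec : Claim_equal_auto_normalize_ckpt_state_dict_py := by
  intro c t _ hpre
  have hnd : (c.map Prod.fst).Nodup := hpre
  unfold Spec_auto_normalize_ckpt_state_dict_py
  rw [pv_A_char, pv_B_char]
  dsimp only
  have hfun : (fun (st : PySem.Dict String Int × String × Int) (pref : String) =>
        if pvHitsSumA c t pref > st.2.2 then (pvRemap c pref, pref, pvHitsSumA c t pref) else st)
      = (fun st pref => if pvCnt c t pref > st.2.2 then (pvRemap c pref, pref, pvCnt c t pref) else st) := by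
    funext st pref
    rw [show pvHitsSumA c t pref = pvCnt c t pref from pv_hitsA hnd t pref]
  rw [hfun]
  rw [PySem.List.foldl_congr_mem (pvFixed ++ pvRoots c)
      (fun (st : String × Int) p =>
        if (pvHitsDictB c t).getD p 0 > st.2 then (p, (pvHitsDictB c t).getD p 0) else st)
      (fun st p => if pvCnt c t p > st.2 then (p, pvCnt c t p) else st) ("", -1)
      (by intro acc x hx; dsimp only; rw [pv_hitsDict_eq_cnt hx])]
  rw [show pvFixed ++ pvRoots c
      = "" :: (["p_frame_model.", "model.", "module.", "net.", "video.", "video_model.", "p_model."] ++ pvRoots c) from rfl]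
  rw [List.foldl_cons, List.foldl_cons]
  dsimp only
  rw [if_pos (by have := pv_cnt_nonneg c t ""; omega),
      if_pos (by have := pv_cnt_nonneg c t ""; omega)]
  rw [pv_sel_fold (pvCnt c t) (pvRemap c) _ _ _ _ rfl]
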